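-- pv_equiv track=rewrite | github.com/2yuna13/Algorithm | 프로그래머스/2/42584. 주식가격/주식가격.py | solution
-- ===== SOURCE A (Python) =====
-- def solution(prices):
--     answer = [0] * len(prices)
--     stack = []
--
--     for i in range(len(prices)):
--         # 현재 숫자가 마지막 가격보다 작을 때 -> 초 기록
--         while stack and prices[stack[-1]] > prices[i]:
--             idx = stack.pop()
--             answer[idx] = i - idx
--
--         stack.append(i)
--
--     for idx in stack:
--         answer[idx] = len(prices) - idx - 1
--
--     return answer
-- ===== SOURCE B (Python) =====
-- def solution(prices):
--     n = len(prices)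
--     answer = []
--     for i in range(n):
--         c = 0
--         for j in range(i + 1, n):
--             c += 1
--             if prices[i] > prices[j]:
--                 break
--         answer.append(c)
--     return answer
-- ===== Notes on version B (the rewrite author's own statement) =====
-- stated objective: alternative
-- what changed: Replaced the monotonic-stack single pass with a direct per-index forward scan (for each i, count seconds until the first strictly smaller later price), removing the stack and the deferred answer updates.
import Mathlib
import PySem

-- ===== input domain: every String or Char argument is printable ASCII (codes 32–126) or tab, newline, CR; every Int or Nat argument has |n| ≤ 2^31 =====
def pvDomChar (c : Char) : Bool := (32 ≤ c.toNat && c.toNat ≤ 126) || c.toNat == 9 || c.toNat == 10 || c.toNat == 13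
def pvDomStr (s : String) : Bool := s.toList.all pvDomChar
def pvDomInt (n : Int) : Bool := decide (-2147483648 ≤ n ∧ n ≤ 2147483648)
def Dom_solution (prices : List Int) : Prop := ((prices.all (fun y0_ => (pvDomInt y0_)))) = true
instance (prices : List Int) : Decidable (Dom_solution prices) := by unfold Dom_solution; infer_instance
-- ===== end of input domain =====

-- B replaces A's monotonic stack by a plain per-index forward scan; same values, no speed claim.

-- ===== PORT A =====
-- The stack is kept top-first (Python appends/pops at the end; here the head is the top).
-- All indexing is by construction in range, so `getD _ 0` equals Python's `prices[...]`.

-- the `while stack and prices[stack[-1]] > prices[i]` loop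
def popLoop (prices : List Int) (i : Nat) : List Int → List Nat → (List Int × List Nat)
  | ans, [] => (ans, [])
  | ans, t :: st =>
    if prices.getD i 0 < prices.getD t 0 then
      popLoop prices i (ans.set t ((i : Int) - (t : Int))) st
    else (ans, t :: st)

-- one iteration of the main `for i in range(len(prices))` loop
def stepA (prices : List Int) (s : List Int × List Nat) (i : Nat) : List Int × List Nat :=
  let r := popLoop prices i s.1 s.2
  (r.1, i :: r.2)

def solution (prices : List Int) : List Int :=
  let n := prices.length
  let s := (List.range n).foldl (stepA prices) (List.replicate n 0, [])
  -- `for idx in stack:` runs bottom-to-top, i.e. over the reverse of our top-first stack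
  s.2.reverse.foldl (fun ans idx => ans.set idx ((n : Int) - (idx : Int) - 1)) s.1

-- ===== PORT B =====
-- inner loop of B: count steps forward, stop after the first strictly smaller price
def scanCount (p : Int) : List Int → Int
  | [] => 0
  | q :: rest => if p > q then 1 else 1 + scanCount p rest

-- outer loop of B: iterating i over range(n) = iterating over the suffixes of prices
def altAux : List Int → List Int
  | [] => []
  | p :: rest => scanCount p rest :: altAux rest

def solution_alt (prices : List Int) : List Int := altAux prices

-- ===== PRECONDITION & SPEC =====
def Spec_solution (prices : List Int) (out : List Int) : Prop := out = solution_alt prices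
instance (prices : List Int) (out : List Int) : Decidable (Spec_solution prices out) := by unfold Spec_solution; infer_instance

-- ===== CLAIM (what is proved, stated in full; the proofs are below) =====
def Claim_equal_solution : Prop := ∀ (prices : List Int), Dom_solution prices → Spec_solution prices (solution prices)

-- ===== LEMMAS AND PROOFS =====

-- abbreviation used in the proofs
def pr (prices : List Int) (j : Nat) : Int := prices.getD j 0

-- the stack order: deeper entries have smaller index and smaller-or-equal price
def Mono (prices : List Int) (st : List Nat) : Prop :=
  List.Pairwise (fun a b => b < a ∧ pr prices b ≤ pr prices a) st

-- the loop invariant of A's main loop: after the first i iterations, state (ans, st)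
structure AInv (prices : List Int) (i : Nat) (ans : List Int) (st : List Nat) : Prop where
  len : ans.length = prices.length
  lt : ∀ t ∈ st, t < i
  mono : Mono prices st
  resolved : ∀ j, j < i → j ∉ st →
    ∃ k, j < k ∧ k < i ∧ pr prices k < pr prices j ∧
      (∀ m, j < m → m < k → pr prices j ≤ pr prices m) ∧
      ans.getD j 0 = (k : Int) - (j : Int)
  pending : ∀ t ∈ st, (∀ m, t < m → m < i → pr prices t ≤ pr prices m) ∧ ans.getD t 0 = 0
  fresh : ∀ j, i ≤ j → ans.getD j 0 = 0

theorem scanCount_no_drop (p : Int) (l : List Int)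
    (h : ∀ r, r < l.length → p ≤ l.getD r 0) : scanCount p l = (l.length : Int) := by
  induction l with
  | nil => simp [scanCount]
  | cons q rest ih =>
    have h0 := h 0 (by simp)
    simp [List.getD] at h0
    have hq : ¬ p > q := not_lt.mpr h0
    simp only [scanCount, if_neg hq]
    rw [ih (fun r hr => by have := h (r+1) (by simpa using Nat.succ_lt_succ hr); simpa [List.getD] using this)]
    simp; ring

theorem scanCount_drop (p : Int) (l : List Int) (m : Nat)
    (hm : m < l.length) (hdrop : l.getD m 0 < p)
    (habove : ∀ r, r < m → p ≤ l.getD r 0) : scanCount p l = (m : Int) + 1 := by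
  induction l generalizing m with
  | nil => simp at hm
  | cons q rest ih =>
    cases m with
    | zero =>
      simp [List.getD] at hdrop
      simp [scanCount, hdrop]
    | succ m =>
      have h0 := habove 0 (Nat.succ_pos _)
      simp [List.getD] at h0
      have hq : ¬ p > q := not_lt.mpr h0
      simp only [scanCount, if_neg hq]
      rw [ih m (by simpa using Nat.lt_of_succ_lt_succ hm) (by simpa [List.getD] using hdrop)
        (fun r hr => by have := habove (r+1) (Nat.succ_lt_succ hr); simpa [List.getD] using this)]
      push_cast; ring

theorem altAux_length (l : List Int) : (altAux l).length = l.length := by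
  induction l with
  | nil => rfl
  | cons p rest ih => simp [altAux, ih]

theorem altAux_getD (l : List Int) (j : Nat) (hj : j < l.length) :
    (altAux l).getD j 0 = scanCount (l.getD j 0) (l.drop (j+1)) := by
  induction l generalizing j with
  | nil => simp at hj
  | cons p rest ih =>
    cases j with
    | zero => simp [altAux, List.getD]
    | succ j =>
      have := ih j (by simpa using Nat.lt_of_succ_lt_succ hj)
      simpa [altAux, List.getD] using this

theorem getD_drop (l : List Int) (a r : Nat) (h : a + r < l.length) :
    (l.drop a).getD r 0 = l.getD (a + r) 0 := by
  have hr : r < (l.drop a).length := by simp [List.length_drop]; omega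
  rw [List.getD_eq_getElem _ _ hr, List.getD_eq_getElem _ _ h]
  simp

-- characterisation of B's entries from the "first strict drop" data
theorem alt_entry_drop (prices : List Int) (j k : Nat) (hj : j < prices.length)
    (hjk : j < k) (hk : k < prices.length) (hdrop : pr prices k < pr prices j)
    (habove : ∀ m, j < m → m < k → pr prices j ≤ pr prices m) :
    (altAux prices).getD j 0 = (k : Int) - (j : Int) := by
  rw [altAux_getD _ _ hj]
  have := scanCount_drop (prices.getD j 0) (prices.drop (j+1)) (k - j - 1)
    (by simp [List.length_drop]; omega)
    (by rw [getD_drop _ _ _ (by omega)]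
        have he : j + 1 + (k - j - 1) = k := by omega
        rw [he]; exact hdrop)
    (fun r hr => by
      rw [getD_drop _ _ _ (by omega)]
      exact habove (j+1+r) (by omega) (by omega))
  rw [this]
  have he : ((k - j - 1 : Nat) : Int) = (k : Int) - (j : Int) - 1 := by omega
  rw [he]; ring

theorem alt_entry_no_drop (prices : List Int) (j : Nat) (hj : j < prices.length)
    (h : ∀ m, j < m → m < prices.length → pr prices j ≤ pr prices m) :
    (altAux prices).getD j 0 = (prices.length : Int) - (j : Int) - 1 := by
  rw [altAux_getD _ _ hj]
  rw [scanCount_no_drop _ _ (fun r hr => by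
    have hlt : j + 1 + r < prices.length := by simp [List.length_drop] at hr; omega
    rw [getD_drop _ _ _ hlt]
    exact h (j+1+r) (by omega) (by omega))]
  simp [List.length_drop]; omega

-- specification of the pop loop
theorem popLoop_spec (prices : List Int) (i : Nat) (ans : List Int) (st : List Nat)
    (hmono : Mono prices st) (hbound : ∀ t ∈ st, t < ans.length) :
    ∃ popped, st = popped ++ (popLoop prices i ans st).2 ∧
      (popLoop prices i ans st).1.length = ans.length ∧
      (∀ t ∈ popped, pr prices i < pr prices t ∧ (popLoop prices i ans st).1.getD t 0 = (i : Int) - (t : Int)) ∧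
      (∀ j, j ∉ popped → (popLoop prices i ans st).1.getD j 0 = ans.getD j 0) ∧
      (∀ t ∈ (popLoop prices i ans st).2, pr prices t ≤ pr prices i) ∧
      Mono prices (popLoop prices i ans st).2 := by
  induction st generalizing ans with
  | nil => exact ⟨[], by simp [popLoop, Mono]⟩
  | cons t rest ih =>
    have hrel := (List.pairwise_cons.mp hmono).1
    by_cases hc : prices.getD i 0 < prices.getD t 0
    · have heq : popLoop prices i ans (t :: rest) = popLoop prices i (ans.set t ((i : Int) - (t : Int))) rest := by
        simp only [popLoop]; rw [if_pos hc]
      obtain ⟨popped, h1, h2, h3, h4, h5, h6⟩ := ih (ans.set t ((i : Int) - (t : Int)))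
        (List.Pairwise.of_cons hmono)
        (fun u hu => by simpa using hbound u (List.mem_cons_of_mem _ hu))
      have htpop : t ∉ popped := by
        intro hmem
        have hmem' : t ∈ rest := by rw [h1]; exact List.mem_append_left _ hmem
        exact absurd (hrel t hmem').1 (lt_irrefl t)
      refine ⟨t :: popped, by simpa [heq] using congrArg (t :: ·) h1, by simpa [heq] using h2, ?_, ?_, by simpa [heq] using h5, by simpa [heq, Mono] using h6⟩
      · intro u hu
        rcases List.mem_cons.mp hu with rfl | hu
        · refine ⟨hc, ?_⟩
          rw [heq, h4 u htpop]
          have htl : u < ans.length := hbound u (List.mem_cons_self ..)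
          rw [List.getD_eq_getElem _ _ (by simpa using htl), List.getElem_set_self]
        · exact ⟨(h3 u hu).1, by rw [heq]; exact (h3 u hu).2⟩
      · intro j hj
        rw [heq, h4 j (fun h => hj (List.mem_cons_of_mem _ h))]
        have hjt : j ≠ t := fun h => hj (h ▸ List.mem_cons_self ..)
        by_cases hjl : j < ans.length
        · rw [List.getD_eq_getElem _ _ (by simpa using hjl), List.getD_eq_getElem _ _ hjl,
            List.getElem_set_ne (by omega)]
        · rw [List.getD_eq_default _ _ (by simpa using Nat.le_of_not_lt hjl),
            List.getD_eq_default _ _ (Nat.le_of_not_lt hjl)]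
    · have heq : popLoop prices i ans (t :: rest) = (ans, t :: rest) := by
        simp only [popLoop]; rw [if_neg hc]
      refine ⟨[], by simp [heq], by simp [heq], by simp, by simp [heq], ?_, by simpa [heq, Mono] using hmono⟩
      intro u hu
      rw [heq] at hu
      rcases List.mem_cons.mp hu with rfl | hu
      · exact not_lt.mp hc
      · exact le_trans (hrel u hu).2 (not_lt.mp hc)

-- one step of the main loop preserves the invariant
theorem stepA_preserves (prices : List Int) (i : Nat) (ans : List Int) (st : List Nat)
    (hi : i < prices.length) (hInv : AInv prices i ans st) :
    AInv prices (i+1) (stepA prices (ans, st) i).1 (stepA prices (ans, st) i).2 := by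
  obtain ⟨popped, h1, h2, h3, h4, h5, h6⟩ := popLoop_spec prices i ans st hInv.mono
    (fun t ht => by rw [hInv.len]; exact lt_trans (hInv.lt t ht) hi)
  set r := popLoop prices i ans st with hr
  have hstep1 : (stepA prices (ans, st) i).1 = r.1 := rfl
  have hstep2 : (stepA prices (ans, st) i).2 = i :: r.2 := rfl
  rw [hstep1, hstep2]
  have hsub : ∀ t ∈ r.2, t ∈ st := fun t ht => by rw [h1]; exact List.mem_append_right _ ht
  have hpopsub : ∀ t ∈ popped, t ∈ st := fun t ht => by rw [h1]; exact List.mem_append_left _ ht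
  have hfreshkeep : ∀ j, i ≤ j → r.1.getD j 0 = 0 := by
    intro j hj
    have hnp : j ∉ popped := fun hmem => absurd (hInv.lt j (hpopsub j hmem)) (by omega)
    rw [h4 j hnp]; exact hInv.fresh j hj
  constructor
  · rw [h2]; exact hInv.len
  · intro t ht
    rcases List.mem_cons.mp ht with rfl | ht
    · omega
    · exact lt_trans (hInv.lt t (hsub t ht)) (Nat.lt_succ_self i)
  · exact List.pairwise_cons.mpr ⟨fun u hu => ⟨hInv.lt u (hsub u hu), h5 u hu⟩, h6⟩
  · intro j hj hjn
    have hji : j ≠ i := fun h => hjn (by rw [h]; exact List.mem_cons_self ..)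
    have hjlt : j < i := by omega
    by_cases hjst : j ∈ st
    · -- j was on the stack and must have been popped at step i
      have hjpop : j ∈ popped := by
        rw [h1] at hjst
        rcases List.mem_append.mp hjst with h | h
        · exact h
        · exact absurd (List.mem_cons_of_mem _ h) hjn
      obtain ⟨hdrop, hval⟩ := h3 j hjpop
      exact ⟨i, hjlt, Nat.lt_succ_self i, hdrop, fun m hm1 hm2 => (hInv.pending j hjst).1 m hm1 hm2, hval⟩
    · obtain ⟨k, hk1, hk2, hk3, hk4, hk5⟩ := hInv.resolved j hjlt hjst
      have hnp : j ∉ popped := fun hmem => hjst (hpopsub j hmem)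
      exact ⟨k, hk1, by omega, hk3, hk4, by rw [h4 j hnp]; exact hk5⟩
  · intro t ht
    rcases List.mem_cons.mp ht with rfl | ht
    · exact ⟨fun m hm1 hm2 => by omega, hfreshkeep t (le_refl t)⟩
    · have hmem := hsub t ht
      have hnotpop : t ∉ popped := by
        intro hmem2
        exact absurd (h5 t ht) (not_le.mpr (h3 t hmem2).1)
      refine ⟨fun m hm1 hm2 => ?_, by rw [h4 t hnotpop]; exact (hInv.pending t hmem).2⟩
      rcases Nat.lt_or_ge m i with h | h
      · exact (hInv.pending t hmem).1 m hm1 h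
      · have hmi : m = i := by omega
        subst hmi
        exact h5 t ht
  · intro j hj
    exact hfreshkeep j (by omega)

-- the invariant holds after the whole main loop
theorem mainLoop_inv (prices : List Int) (i : Nat) (hi : i ≤ prices.length) :
    AInv prices i ((List.range i).foldl (stepA prices) (List.replicate prices.length 0, [])).1
      ((List.range i).foldl (stepA prices) (List.replicate prices.length 0, [])).2 := by
  induction i with
  | zero =>
    refine ⟨by simp, by simp, by simp [Mono], by simp, by simp, fun j hj => ?_⟩
    by_cases h : j < prices.length
    · rw [List.getD_eq_getElem _ _ (by simpa using h)]; simp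
    · rw [List.getD_eq_default _ _ (by simpa using Nat.le_of_not_lt h)]
  | succ i ih =>
    rw [List.range_succ, List.foldl_append]
    have hInv := ih (by omega)
    have := stepA_preserves prices i _ _ (by omega) hInv
    simpa using this

-- the final loop writes (n - idx - 1) at each stack index and touches nothing else
theorem finalLoop_getD (prices : List Int) (l : List Nat) (ans : List Int) (j : Nat)
    (hlen : ans.length = prices.length) :
    ((l.foldl (fun a idx => a.set idx ((prices.length : Int) - (idx : Int) - 1)) ans).getD j 0 =
      if j ∈ l ∧ j < prices.length then (prices.length : Int) - (j : Int) - 1 else ans.getD j 0) := by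
  induction l generalizing ans with
  | nil => simp
  | cons t rest ih =>
    simp only [List.foldl_cons]
    rw [ih _ (by simp [hlen])]
    by_cases hjr : j ∈ rest ∧ j < prices.length
    · rw [if_pos hjr, if_pos ⟨List.mem_cons_of_mem _ hjr.1, hjr.2⟩]
    · rw [if_neg hjr]
      by_cases hjt : j = t ∧ j < prices.length
      · obtain ⟨rfl, hjn⟩ := hjt
        rw [if_pos ⟨List.mem_cons_self .., hjn⟩,
          List.getD_eq_getElem _ _ (by simp [hlen]; omega), List.getElem_set_self]
      · have hcase : ¬ (j ∈ t :: rest ∧ j < prices.length) := by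
          intro hand
          rcases List.mem_cons.mp hand.1 with rfl | hmem
          · exact hjt ⟨rfl, hand.2⟩
          · exact hjr ⟨hmem, hand.2⟩
        rw [if_neg hcase]
        by_cases hjl : j < ans.length
        · by_cases hjteq : j = t
          · exact absurd ⟨hjteq, by rw [← hlen]; exact hjl⟩ hjt
          · rw [List.getD_eq_getElem _ _ (by simpa using hjl), List.getD_eq_getElem _ _ hjl,
              List.getElem_set_ne (by omega)]
        · rw [List.getD_eq_default _ _ (by simpa using Nat.le_of_not_lt hjl),
            List.getD_eq_default _ _ (Nat.le_of_not_lt hjl)]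

theorem foldl_set_length (l : List Nat) (ans : List Int) (v : Nat → Int) :
    (l.foldl (fun a idx => a.set idx (v idx)) ans).length = ans.length := by
  induction l generalizing ans with
  | nil => rfl
  | cons t rest ih => simp [List.foldl_cons, ih]

theorem solution_length (prices : List Int) : (solution prices).length = prices.length := by
  have hInv := mainLoop_inv prices prices.length (le_refl _)
  unfold solution
  rw [foldl_set_length]
  exact hInv.len

theorem solution_getD (prices : List Int) (j : Nat) (hj : j < prices.length) :
    (solution prices).getD j 0 = (solution_alt prices).getD j 0 := by
  have hInv := mainLoop_inv prices prices.length (le_refl _)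
  set s := (List.range prices.length).foldl (stepA prices) (List.replicate prices.length 0, []) with hs
  have hsol : solution prices =
      s.2.reverse.foldl (fun ans idx => ans.set idx ((prices.length : Int) - (idx : Int) - 1)) s.1 := rfl
  rw [hsol, finalLoop_getD prices _ _ _ hInv.len]
  show _ = (altAux prices).getD j 0
  by_cases hmem : j ∈ s.2
  · rw [if_pos ⟨by simpa using hmem, hj⟩]
    exact (alt_entry_no_drop prices j hj (fun m hm1 hm2 => (hInv.pending j hmem).1 m hm1 hm2)).symm
  · rw [if_neg (by simp [hmem])]
    obtain ⟨k, hk1, hk2, hk3, hk4, hk5⟩ := hInv.resolved j hj hmem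
    rw [hk5]
    exact (alt_entry_drop prices j k hj hk1 hk2 hk3 hk4).symm

-- ===== VERDICT (by name: the statement is the Claim_ definition above) =====
theorem solution_spec : Claim_equal_solution := by
  intro prices _
  unfold Spec_solution solution_alt
  apply List.ext_getElem
  · rw [solution_length, altAux_length]
  · intro j h1 h2
    have hj : j < prices.length := by rwa [solution_length] at h1
    have h := solution_getD prices j hj
    rw [List.getD_eq_getElem _ _ h1] at h
    rw [show solution_alt prices = altAux prices from rfl, List.getD_eq_getElem _ _ h2] at h
    exact h
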